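-- pv_equiv track=rewrite | github.com/CrispyConductor/tmux-copy-toolkit | copytk.py | process_pane_capture_lines
-- ===== SOURCE A (Python) =====
-- def process_pane_capture_lines(data, nlines=None):
-- 	# processes pane capture data into an array of lines
-- 	# also handles nonprintables
-- 	lines = [
-- 		''.join([
-- 			'        ' if c == '\t' else (
-- 				c if c.isprintable() else ''
-- 			)
-- 			for c in line
-- 		])
-- 		for line in data.split('\n')
-- 	]
-- 	if nlines != None:
-- 		lines = lines[:nlines]
-- 	return lines
-- ===== SOURCE B (Python) =====
-- def process_pane_capture_lines(data, nlines=None):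
-- 	# single pass over the raw text: build the lines as we go
-- 	# (instead of split('\n') followed by a per-line comprehension)
-- 	lines = []
-- 	cur = []
-- 	for c in data:
-- 		if c == '\n':
-- 			lines.append(''.join(cur))
-- 			cur = []
-- 		elif c == '\t':
-- 			cur.append('        ')
-- 		elif c.isprintable():
-- 			cur.append(c)
-- 	lines.append(''.join(cur))
-- 	if nlines != None:
-- 		lines = lines[:nlines]
-- 	return lines
-- ===== Notes on version B (the rewrite author's own statement) =====
-- stated objective: alternative
-- what changed: Replaces splitting the capture into lines first and then a nested per-line/per-char comprehension by one single pass over the raw text with a line accumulator that is flushed at each newline.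
import Mathlib
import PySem

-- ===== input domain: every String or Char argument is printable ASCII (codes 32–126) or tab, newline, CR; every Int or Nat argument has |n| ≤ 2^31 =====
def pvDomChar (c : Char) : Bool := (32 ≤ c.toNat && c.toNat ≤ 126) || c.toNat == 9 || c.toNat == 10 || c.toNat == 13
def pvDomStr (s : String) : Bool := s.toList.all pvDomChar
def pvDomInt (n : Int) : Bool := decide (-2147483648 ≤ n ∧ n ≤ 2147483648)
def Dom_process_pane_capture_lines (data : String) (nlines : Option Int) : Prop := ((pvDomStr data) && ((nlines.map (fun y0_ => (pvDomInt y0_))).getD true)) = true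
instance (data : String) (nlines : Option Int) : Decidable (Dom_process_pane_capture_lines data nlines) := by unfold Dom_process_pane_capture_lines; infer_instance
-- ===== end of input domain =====

-- B replaces split('\n') + a nested per-line comprehension by one single pass with a line
-- accumulator flushed at each newline (objective: alternative decomposition, same cost).

-- ===== PORT A =====
-- hand port of c.isprintable(), exact on the Dom alphabet (printable ASCII 32–126; tab/newline/CR are not printable)
def pyPrintable (c : Char) : Bool := 32 ≤ c.toNat && c.toNat ≤ 126

def pclBranch (c : Char) : String :=
  if c == '\t' then "        " else if pyPrintable c then String.singleton c else ""

def process_pane_capture_lines (data : String) (nlines : Option Int) : List String :=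
  let lines := (PySem.Chars.splitOn data.toList ['\n']).map
    (fun line => PySem.Str.join "" (line.map pclBranch))
  match nlines with
  | none => lines
  | some n => PySem.List.slice lines none (some n)

-- ===== PORT B =====
def pclStep (st : List String × List String) (c : Char) : List String × List String :=
  if c == '\n' then (st.1 ++ [PySem.Str.join "" st.2], [])
  else if c == '\t' then (st.1, st.2 ++ ["        "])
  else if pyPrintable c then (st.1, st.2 ++ [String.singleton c])
  else st

def process_pane_capture_lines_alt (data : String) (nlines : Option Int) : List String :=
  let st := data.toList.foldl pclStep ([], [])
  let lines := st.1 ++ [PySem.Str.join "" st.2]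
  match nlines with
  | none => lines
  | some n => PySem.List.slice lines none (some n)

-- ===== PRECONDITION & SPEC =====
def Spec_process_pane_capture_lines (data : String) (nlines : Option Int) (out : List String) : Prop := out = process_pane_capture_lines_alt data nlines
instance (data : String) (nlines : Option Int) (out : List String) : Decidable (Spec_process_pane_capture_lines data nlines out) := by unfold Spec_process_pane_capture_lines; infer_instance

-- ===== CLAIM (what is proved, stated in full; the proofs are below) =====
def Claim_equal_process_pane_capture_lines : Prop := ∀ (data : String) (nlines : Option Int), Dom_process_pane_capture_lines data nlines → Spec_process_pane_capture_lines data nlines (process_pane_capture_lines data nlines)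

-- ===== LEMMAS AND PROOFS =====

-- simple recursion computing Python's split('\n')
def split1 : List Char → List (List Char)
  | [] => [[]]
  | c :: r => if c = '\n' then [] :: split1 r else (c :: (split1 r).headI) :: (split1 r).tail

-- chars one input char contributes to its cleaned line
def emitc (c : Char) : List Char :=
  if c == '\t' then "        ".toList else if pyPrintable c then [c] else []

-- the cleaned line of one segment
def gseg (s : List Char) : String := String.ofList (s.flatMap emitc)

theorem split1_ne_nil (l : List Char) : split1 l ≠ [] := by
  cases l with
  | nil => simp [split1]
  | cons c r => unfold split1; split_ifs <;> simp

theorem split1_head_tail (l : List Char) : split1 l = (split1 l).headI :: (split1 l).tail := by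
  cases h : split1 l with
  | nil => exact absurd h (split1_ne_nil l)
  | cons a t => simp

theorem joinEmpty (l : List (List Char)) : PySem.Chars.join [] l = l.flatten := by
  induction l with
  | nil => simp [PySem.Chars.join_nil]
  | cons a r ih =>
    cases r with
    | nil => simp [PySem.Chars.join_singleton]
    | cons b t => rw [PySem.Chars.join_cons_cons]; simp_all

theorem joinStr (parts : List String) :
    PySem.Str.join "" parts = String.ofList (parts.flatMap String.toList) := by
  unfold PySem.Str.join
  rw [show ("" : String).toList = [] from rfl, joinEmpty, List.flatten_eq_flatMap, List.flatMap_map]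
  simp

theorem go_spec (fuel : ℕ) : ∀ (l cur : List Char) (acc : List (List Char)), l.length < fuel →
    PySem.Chars.splitOn.go ['\n'] fuel l cur acc
      = acc.reverse ++ (cur.reverse ++ (split1 l).headI) :: (split1 l).tail := by
  induction fuel with
  | zero => intro l cur acc h; omega
  | succ n ih =>
    intro l cur acc h
    cases l with
    | nil => simp [PySem.Chars.splitOn.go, split1]
    | cons c rest =>
      rw [PySem.Chars.splitOn.go]
      by_cases hc : c = '\n'
      · subst hc
        have hp : List.isPrefixOf ['\n'] ('\n' :: rest) = true := by
          simp [List.isPrefixOf]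
        rw [if_pos hp]
        simp only [List.length_singleton, List.drop_succ_cons, List.drop_zero]
        simp only [List.length_cons] at h
        rw [ih rest [] _ (by omega)]
        have h1 : split1 ('\n' :: rest) = [] :: split1 rest := by simp [split1]
        rw [h1]
        simp only [List.headI_cons, List.tail_cons, List.reverse_cons, List.reverse_nil,
          List.nil_append, List.append_assoc, List.singleton_append]
        rw [← split1_head_tail rest]
        simp
      · have hp : List.isPrefixOf ['\n'] (c :: rest) = false := by
          simp only [List.isPrefixOf, Bool.and_eq_false_iff, beq_eq_false_iff_ne, ne_eq]
          exact Or.inl fun h => hc h.symm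
        rw [if_neg (by simp [hp])]
        simp only [List.length_cons] at h
        rw [ih rest (c :: cur) acc (by omega)]
        simp [split1, hc]

theorem splitOn_eq_split1 (cs : List Char) : PySem.Chars.splitOn cs ['\n'] = split1 cs := by
  unfold PySem.Chars.splitOn
  rw [go_spec (cs.length + 1) cs [] [] (by omega)]
  simpa using (split1_head_tail cs).symm

theorem toList_pclBranch (c : Char) : (pclBranch c).toList = emitc c := by
  unfold pclBranch emitc
  split_ifs <;> simp

theorem lineA_eq (s : List Char) : PySem.Str.join "" (s.map pclBranch) = gseg s := by
  rw [joinStr, gseg, List.flatMap_map]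
  congr 1
  exact List.flatMap_congr (fun c _ => toList_pclBranch c)

theorem foldB (cs : List Char) : ∀ (lines cur : List String),
    (cs.foldl pclStep (lines, cur)).1 ++ [PySem.Str.join "" (cs.foldl pclStep (lines, cur)).2]
      = lines ++ String.ofList (cur.flatMap String.toList ++ (split1 cs).headI.flatMap emitc)
          :: ((split1 cs).tail.map gseg) := by
  induction cs with
  | nil =>
    intro lines cur
    simp [split1, joinStr]
  | cons c rest ih =>
    intro lines cur
    by_cases hc : c = '\n'
    · subst hc
      rw [List.foldl_cons, show pclStep (lines, cur) '\n' = (lines ++ [PySem.Str.join "" cur], []) from by simp [pclStep]]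
      rw [ih]
      have h1 : split1 ('\n' :: rest) = [] :: split1 rest := by simp [split1]
      have h2 : split1 rest = (split1 rest).headI :: (split1 rest).tail := split1_head_tail rest
      rw [h1]
      simp only [List.headI_cons, List.tail_cons, List.flatMap_nil, List.append_nil,
        List.append_assoc, List.singleton_append]
      rw [joinStr]
      congr 2
      conv_rhs => rw [h2]
      simp [gseg]
    · have hcur : ∃ cur', pclStep (lines, cur) c = (lines, cur')
          ∧ cur'.flatMap String.toList = cur.flatMap String.toList ++ emitc c := by
        unfold pclStep emitc
        rw [if_neg (by simp [hc])]
        split_ifs with h1 h2 <;> exact ⟨_, rfl, by simp⟩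
      obtain ⟨cur', hstep, hflat⟩ := hcur
      rw [List.foldl_cons, hstep, ih, hflat]
      simp [split1, hc]

-- ===== VERDICT (by name: the statement is the Claim_ definition above) =====
theorem process_pane_capture_lines_spec : Claim_equal_process_pane_capture_lines := by
  intro data nlines _
  unfold Spec_process_pane_capture_lines process_pane_capture_lines process_pane_capture_lines_alt
  dsimp only
  have hB := foldB data.toList [] []
  simp only [List.flatMap_nil, List.nil_append] at hB
  have hA : (PySem.Chars.splitOn data.toList ['\n']).map
      (fun line => PySem.Str.join "" (line.map pclBranch))
      = (split1 data.toList).map gseg := by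
    rw [splitOn_eq_split1]
    exact List.map_congr_left (fun s _ => lineA_eq s)
  have hmap : (split1 data.toList).map gseg
      = String.ofList ((split1 data.toList).headI.flatMap emitc)
          :: ((split1 data.toList).tail.map gseg) := by
    conv_lhs => rw [split1_head_tail data.toList]
    simp [gseg]
  rw [hA, hmap, hB]
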